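-- pv_equiv track=rewrite | github.com/Andre-lab/mutsel-rate-manuscript | scripts/site_vector_ensemble_fit/estimate_Q_matrix_musel_freq_dist_mpi.py | aa2codons
-- ===== SOURCE A (Python) =====
-- def aa2codons(target_aa):
--     bases = ['T', 'C', 'A', 'G']
--     codons = [a + b + c for a in bases for b in bases for c in bases]
--     amino_acids = 'FFLLSSSSYY**CC*WLLLLPPPPHHQQRRRRIIIMTTTTNNKKSSRRVVVVAAAADDEEGGGG'
--     codons_of_aa = []
--     for aa, codon in zip(amino_acids, codons):
--         if aa == target_aa:
--             codons_of_aa.append(codon)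
--     return codons_of_aa
-- ===== SOURCE B (Python) =====
-- def aa2codons(target_aa):
--     bases = 'TCAG'
--     amino_acids = 'FFLLSSSSYY**CC*WLLLLPPPPHHQQRRRRIIIMTTTTNNKKSSRRVVVVAAAADDEEGGGG'
--     groups = {}
--     for i, aa in enumerate(amino_acids):
--         codon = bases[i // 16] + bases[(i // 4) % 4] + bases[i % 4]
--         groups.setdefault(aa, []).append(codon)
--     return groups.get(target_aa, [])
-- ===== Notes on version B (the rewrite author's own statement) =====
-- stated objective: idiomatic
-- what changed: B builds a full amino-acid-to-codons inverted index in one enumerate pass, decoding each codon from its index by base-4 arithmetic instead of a triple nested comprehension, and answers with a single dict lookup instead of accumulate-while-filtering.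
import Mathlib
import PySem

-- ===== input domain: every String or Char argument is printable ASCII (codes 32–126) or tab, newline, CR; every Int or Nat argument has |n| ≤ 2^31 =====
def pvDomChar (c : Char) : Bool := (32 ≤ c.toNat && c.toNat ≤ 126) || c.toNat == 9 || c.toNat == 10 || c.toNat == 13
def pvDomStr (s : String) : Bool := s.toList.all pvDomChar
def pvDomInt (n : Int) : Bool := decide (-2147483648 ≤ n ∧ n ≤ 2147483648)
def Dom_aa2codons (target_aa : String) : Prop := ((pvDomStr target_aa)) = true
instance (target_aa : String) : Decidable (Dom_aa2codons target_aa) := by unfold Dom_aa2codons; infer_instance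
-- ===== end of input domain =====

-- B replaces A's accumulate-while-filtering over a triple-comprehension codon table by a one-pass
-- inverted index (amino acid → codons, codons decoded by base-4 index arithmetic) and a final lookup;
-- objective: idiomatic, same cost.

-- ===== PORT A =====
-- Python '+' on strings, exact (ported at the List Char level; Lean's String.append is kernel-opaque)
def pvCat (x y : String) : String := String.ofList (x.toList ++ y.toList)

def aa2codons (target_aa : String) : List String :=
  let bases : List String := ["T", "C", "A", "G"]
  let codons : List String :=
    bases.flatMap (fun a => bases.flatMap (fun b => bases.map (fun c => pvCat (pvCat a b) c)))
  let amino_acids : List Char :=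
    "FFLLSSSSYY**CC*WLLLLPPPPHHQQRRRRIIIMTTTTNNKKSSRRVVVVAAAADDEEGGGG".toList
  -- for aa, codon in zip(...): if aa == target_aa: append(codon)   (a char of a str is a 1-char str)
  (amino_acids.zip codons).foldl
    (fun acc p => if String.singleton p.1 == target_aa then acc ++ [p.2] else acc) []

-- ===== PORT B =====
def aa2codons_alt (target_aa : String) : List String :=
  let bases : List Char := "TCAG".toList
  let amino_acids : List Char :=
    "FFLLSSSSYY**CC*WLLLLPPPPHHQQRRRRIIIMTTTTNNKKSSRRVVVVAAAADDEEGGGG".toList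
  -- for i, aa in enumerate(...): groups.setdefault(aa, []).append(codon)
  -- bases[...] indexing is always in range here, so pyGetD's default never fires;
  -- the three 1-char strings are concatenated as String.ofList of the three chars (exact)
  let groups : PySem.Dict String (List String) :=
    (PySem.List.enumerate amino_acids 0).foldl
      (fun d p =>
        d.modify (String.singleton p.2) []
          (· ++ [String.ofList
            [PySem.List.pyGetD bases (PySem.Int.floordiv p.1 16) 'T',
             PySem.List.pyGetD bases (PySem.Int.mod (PySem.Int.floordiv p.1 4) 4) 'T',
             PySem.List.pyGetD bases (PySem.Int.mod p.1 4) 'T']]))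
      PySem.Dict.empty
  groups.getD target_aa []

-- ===== PRECONDITION & SPEC =====
def Spec_aa2codons (target_aa : String) (out : List String) : Prop := out = aa2codons_alt target_aa
instance (target_aa : String) (out : List String) : Decidable (Spec_aa2codons target_aa out) := by unfold Spec_aa2codons; infer_instance

-- ===== CLAIM (what is proved, stated in full; the proofs are below) =====
def Claim_equal_aa2codons : Prop := ∀ (target_aa : String), Dom_aa2codons target_aa → Spec_aa2codons target_aa (aa2codons target_aa)

-- ===== LEMMAS AND PROOFS =====

-- B's enumerate pass, reshaped to (key, value) pairs, traverses exactly A's zip table with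
-- singleton-string keys: a closed 64-entry computation.
theorem pv_tables_eq :
    (PySem.List.enumerate "FFLLSSSSYY**CC*WLLLLPPPPHHQQRRRRIIIMTTTTNNKKSSRRVVVVAAAADDEEGGGG".toList 0).map
      (fun p => (String.singleton p.2,
        String.ofList
          [PySem.List.pyGetD "TCAG".toList (PySem.Int.floordiv p.1 16) 'T',
           PySem.List.pyGetD "TCAG".toList (PySem.Int.mod (PySem.Int.floordiv p.1 4) 4) 'T',
           PySem.List.pyGetD "TCAG".toList (PySem.Int.mod p.1 4) 'T']))
    = ("FFLLSSSSYY**CC*WLLLLPPPPHHQQRRRRIIIMTTTTNNKKSSRRVVVVAAAADDEEGGGG".toList.zip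
        (["T", "C", "A", "G"].flatMap (fun a => ["T", "C", "A", "G"].flatMap
          (fun b => ["T", "C", "A", "G"].map (fun c => pvCat (pvCat a b) c))))).map
        (fun p => (String.singleton p.1, p.2)) := by decide

-- ===== VERDICT (by name: the statement is the Claim_ definition above) =====
set_option maxRecDepth 8192 in
theorem aa2codons_spec : Claim_equal_aa2codons := by
  intro t _
  show aa2codons t = aa2codons_alt t
  simp only [aa2codons, aa2codons_alt]
  rw [PySem.List.foldl_append_if]
  have hfold :
      (PySem.List.enumerate "FFLLSSSSYY**CC*WLLLLPPPPHHQQRRRRIIIMTTTTNNKKSSRRVVVVAAAADDEEGGGG".toList 0).foldl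
        (fun d p => d.modify (String.singleton p.2) []
          (· ++ [String.ofList
            [PySem.List.pyGetD "TCAG".toList (PySem.Int.floordiv p.1 16) 'T',
             PySem.List.pyGetD "TCAG".toList (PySem.Int.mod (PySem.Int.floordiv p.1 4) 4) 'T',
             PySem.List.pyGetD "TCAG".toList (PySem.Int.mod p.1 4) 'T']]))
        PySem.Dict.empty
      = ((PySem.List.enumerate "FFLLSSSSYY**CC*WLLLLPPPPHHQQRRRRIIIMTTTTNNKKSSRRVVVVAAAADDEEGGGG".toList 0).map
          (fun p => (String.singleton p.2,
            String.ofList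
              [PySem.List.pyGetD "TCAG".toList (PySem.Int.floordiv p.1 16) 'T',
               PySem.List.pyGetD "TCAG".toList (PySem.Int.mod (PySem.Int.floordiv p.1 4) 4) 'T',
               PySem.List.pyGetD "TCAG".toList (PySem.Int.mod p.1 4) 'T']))).foldl
          (fun d q => d.modify q.1 [] (· ++ [q.2])) PySem.Dict.empty :=
    (List.foldl_map
      (f := fun p : Int × Char => (String.singleton p.2,
        String.ofList
          [PySem.List.pyGetD "TCAG".toList (PySem.Int.floordiv p.1 16) 'T',
           PySem.List.pyGetD "TCAG".toList (PySem.Int.mod (PySem.Int.floordiv p.1 4) 4) 'T',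
           PySem.List.pyGetD "TCAG".toList (PySem.Int.mod p.1 4) 'T']))
      (g := fun (d : PySem.Dict String (List String)) (q : String × String) =>
        d.modify q.1 [] (· ++ [q.2]))).symm
  rw [hfold, PySem.Dict.getD_foldl_modify_append, PySem.Dict.getD_empty, List.nil_append,
     List.nil_append, pv_tables_eq, List.filter_map, List.map_map]
  rfl
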